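-- pv_equiv track=rewrite | github.com/ElectronicxApp/ex-amazon-return-worker | services/jtl_service.py | _normalize_to_single
-- ===== SOURCE A (Python) =====
-- from typing import Dict, Any, List, Optional
--
-- def _normalize_to_single(items: List[Dict[str, Any]], key_field: str = None) -> List[Dict[str, Any]]:
--     """
--     Normalize a list to contain only one element.
--
--     Sometimes JTL queries return duplicate rows with the same data.
--     This method takes the first unique record based on key_field,
--     or just the first record if no key_field is specified.
--
--     Args:
--         items: List of dictionaries
--         key_field: Optional field to use for deduplication
--
--     Returns:
--         List with at most one element
--     """
--     if not items:
--         return []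
--
--     if key_field and len(items) > 1:
--         # Deduplicate based on key field, keep first occurrence
--         seen = set()
--         unique_items = []
--         for item in items:
--             key = item.get(key_field)
--             if key not in seen:
--                 seen.add(key)
--                 unique_items.append(item)
--         # Return only the first unique item
--         return [unique_items[0]] if unique_items else []
--
--     # Just return the first item
--     return [items[0]]
-- ===== SOURCE B (Python) =====
-- from typing import Dict, Any, List
--
-- def _normalize_to_single(items: List[Dict[str, Any]], key_field: str = None) -> List[Dict[str, Any]]:
--     # The dedup loop in A always keeps the first item first, so the result
--     # is simply the first element (or [] for an empty list).
--     return items[:1]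
-- ===== Notes on version B (the rewrite author's own statement) =====
-- stated objective: simpler
-- what changed: Replaced the whole dedup loop (seen-set, unique list, branching on key_field and length) by the closed form items[:1], since A provably always returns the first element.
import Mathlib
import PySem

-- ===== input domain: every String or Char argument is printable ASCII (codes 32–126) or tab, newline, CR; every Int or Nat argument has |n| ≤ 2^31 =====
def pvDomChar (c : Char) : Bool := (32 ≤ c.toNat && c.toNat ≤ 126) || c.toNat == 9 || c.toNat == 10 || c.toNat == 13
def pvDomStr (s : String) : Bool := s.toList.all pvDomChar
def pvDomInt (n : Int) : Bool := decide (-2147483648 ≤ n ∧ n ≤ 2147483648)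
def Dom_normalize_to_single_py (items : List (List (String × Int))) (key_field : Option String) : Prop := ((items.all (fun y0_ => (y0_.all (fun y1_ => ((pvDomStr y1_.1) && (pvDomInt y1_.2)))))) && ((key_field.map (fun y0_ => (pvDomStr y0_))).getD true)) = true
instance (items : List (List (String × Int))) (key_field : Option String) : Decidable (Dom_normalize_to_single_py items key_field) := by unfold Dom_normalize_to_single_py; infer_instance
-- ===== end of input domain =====

-- B replaces A's seen-set dedup loop by the closed form items[:1] (simpler; A always returns the first element).

-- ===== PORT A =====
-- one loop step of A's dedup: skip if key already seen, else record key and append item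
def pvStepA (k : String) (st : PySem.Set (Option Int) × List (List (String × Int)))
    (item : List (String × Int)) : PySem.Set (Option Int) × List (List (String × Int)) :=
  let key := (PySem.Dict.mk item).get? k
  if st.1.contains key then st else (st.1.add key, st.2 ++ [item])

def normalize_to_single_py (items : List (List (String × Int))) (key_field : Option String) : List (List (String × Int)) :=
  match items with
  | [] => []
  | x :: _ =>
    -- `if key_field and len(items) > 1` : None and "" are falsy
    if (match key_field with | some k => decide (k ≠ "") | none => false) && decide (items.length > 1) then
      let st := items.foldl (pvStepA (key_field.getD "")) (PySem.Set.empty, [])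
      match st.2 with
      | [] => []
      | u :: _ => [u]
    else [x]

-- ===== PORT B =====
def normalize_to_single_py_alt (items : List (List (String × Int))) (key_field : Option String) : List (List (String × Int)) :=
  items.take 1

-- ===== PRECONDITION & SPEC =====
def Spec_normalize_to_single_py (items : List (List (String × Int))) (key_field : Option String) (out : List (List (String × Int))) : Prop := out = normalize_to_single_py_alt items key_field
instance (items : List (List (String × Int))) (key_field : Option String) (out : List (List (String × Int))) : Decidable (Spec_normalize_to_single_py items key_field out) := by unfold Spec_normalize_to_single_py; infer_instance

-- ===== CLAIM (what is proved, stated in full; the proofs are below) =====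
def Claim_equal_normalize_to_single_py : Prop := ∀ (items : List (List (String × Int))) (key_field : Option String), Dom_normalize_to_single_py items key_field → Spec_normalize_to_single_py items key_field (normalize_to_single_py items key_field)

-- ===== LEMMAS AND PROOFS =====
-- A's loop only ever appends to the accumulated unique list
theorem pvStepA_fold_prefix (k : String) (l : List (List (String × Int)))
    (s : PySem.Set (Option Int)) (u : List (List (String × Int))) :
    ∃ t, (l.foldl (pvStepA k) (s, u)).2 = u ++ t := by
  induction l generalizing s u with
  | nil => exact ⟨[], by simp⟩
  | cons a l ih =>
    simp only [List.foldl_cons, pvStepA]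
    by_cases h : s.contains ((PySem.Dict.mk a).get? k) = true
    · rw [if_pos h]; exact ih s u
    · rw [if_neg h]
      obtain ⟨t, ht⟩ := ih (s.add ((PySem.Dict.mk a).get? k)) (u ++ [a])
      exact ⟨a :: t, by simpa using ht⟩

-- ===== VERDICT (by name: the statement is the Claim_ definition above) =====
theorem normalize_to_single_py_spec : Claim_equal_normalize_to_single_py := by
  intro items key_field _
  unfold Spec_normalize_to_single_py normalize_to_single_py normalize_to_single_py_alt
  rcases items with _ | ⟨x, rest⟩
  · rfl
  rcases key_field with _ | k
  · simp
  simp only [List.take_succ_cons, List.take_zero, Option.getD]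
  split
  · -- dedup branch: first fold step appends x, the rest of the loop only appends
    have hstep : pvStepA k (PySem.Set.empty, []) x
        = ([(PySem.Dict.mk x).get? k], [x]) := by
      simp [pvStepA, PySem.Set.contains, PySem.Set.empty, PySem.Set.add]
    rw [List.foldl_cons, hstep]
    obtain ⟨t, ht⟩ := pvStepA_fold_prefix k rest [(PySem.Dict.mk x).get? k] [x]
    rw [ht]; rfl
  · rfl
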